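-- pv_equiv track=rewrite | github.com/ErosSph/CARTCOV | proof_core_cegar.py | _rewrite_transition
-- ===== SOURCE A (Python) =====
-- def _rewrite_transition(smt2_text, top_module, kept_regs):
--     lines = smt2_text.splitlines()
--     new_lines = []
--     in_t = False
--     t_lines = []
--     t_header = ""
--     t_footer = ""
--     for line in lines:
--         if line.startswith("(define-fun |%s_t|" % top_module):
--             in_t = True
--             t_header = line
--             t_lines = []
--             continue
--         if in_t:
--             if line.strip().endswith(") ; end of module %s" % top_module):
--                 t_footer = line
--                 in_t = False
--                 kept_lines = []
--                 for tline in t_lines: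
--                     if ";" in tline and "\\" in tline:
--                         reg = tline.split("\\")[-1].strip()
--                         if reg in kept_regs:
--                             kept_lines.append(tline)
--                     else:
--                         kept_lines.append(tline)
--                 if not kept_lines:
--                     new_lines.append(
--                         "(define-fun |%s_t| ((state |%s_s|) (next_state |%s_s|)) Bool true)"
--                         % (top_module, top_module, top_module)
--                     )
--                 else:
--                     new_lines.append(t_header)
--                     new_lines.extend(kept_lines)
--                     new_lines.append(t_footer)
--                 continue
--             t_lines.append(line)
--             continue
--         new_lines.append(line)
--     return "\n".join(new_lines)
-- ===== SOURCE B (Python) =====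
-- def _keep_line(tline, kept_regs):
--     if ";" in tline and "\\" in tline:
--         return tline.split("\\")[-1].strip() in kept_regs
--     return True
--
--
-- def _trivial_def(top_module):
--     return ("(define-fun |%s_t| ((state |%s_s|) (next_state |%s_s|)) Bool true)"
--             % (top_module, top_module, top_module))
--
--
-- def _split_at_headers(lines, header_prefix):
--     """Split lines into (prefix, segments): each segment starts with a header
--     line and runs up to (not including) the next header line."""
--     prefix, segments = [], []
--     for line in lines:
--         if line.startswith(header_prefix):
--             segments.append([line])
--         elif segments:
--             segments[-1].append(line)
--         else:
--             prefix.append(line)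
--     return prefix, segments
--
--
-- def _process_segment(seg, footer_suffix, top_module, kept_regs):
--     header, rest = seg[0], seg[1:]
--     for j, line in enumerate(rest):
--         if line.strip().endswith(footer_suffix):
--             kept = [t for t in rest[:j] if _keep_line(t, kept_regs)]
--             block = [header] + kept + [line] if kept else [_trivial_def(top_module)]
--             return block + rest[j + 1:]
--     return []  # unterminated block: dropped entirely
--
--
-- def _rewrite_transition(smt2_text, top_module, kept_regs):
--     header_prefix = "(define-fun |%s_t|" % top_module
--     footer_suffix = ") ; end of module %s" % top_module
--     prefix, segments = _split_at_headers(smt2_text.splitlines(), header_prefix)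
--     out = prefix
--     for seg in segments:
--         out += _process_segment(seg, footer_suffix, top_module, kept_regs)
--     return "\n".join(out)
-- ===== Notes on version B (the rewrite author's own statement) =====
-- stated objective: alternative
-- what changed: Replaces A's single stateful pass (in_t flag plus block accumulators) by a staged pipeline: first split the lines at header lines into a prefix and independent segments, then map a self-contained per-segment processor (find first footer, filter body, emit block and the tail) over the segments and concatenate.
import Mathlib
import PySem

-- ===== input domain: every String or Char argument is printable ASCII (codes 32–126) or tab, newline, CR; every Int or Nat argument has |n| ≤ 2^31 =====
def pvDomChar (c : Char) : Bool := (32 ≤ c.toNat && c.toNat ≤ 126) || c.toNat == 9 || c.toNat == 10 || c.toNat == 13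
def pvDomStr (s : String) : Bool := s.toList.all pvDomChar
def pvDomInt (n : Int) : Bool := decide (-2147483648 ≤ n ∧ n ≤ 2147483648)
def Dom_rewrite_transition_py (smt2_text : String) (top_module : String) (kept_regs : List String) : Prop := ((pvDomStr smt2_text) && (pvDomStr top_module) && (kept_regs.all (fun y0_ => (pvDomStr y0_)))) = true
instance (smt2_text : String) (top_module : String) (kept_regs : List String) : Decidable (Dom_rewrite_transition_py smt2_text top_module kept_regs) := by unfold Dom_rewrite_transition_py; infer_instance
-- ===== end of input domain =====

-- B replaces A's single stateful pass (in_t flag, block accumulators) by a staged pipeline: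
-- split the lines at header lines into a prefix and independent segments, then map a
-- self-contained per-segment processor over the segments and concatenate; objective: alternative.

-- ===== PORT A =====
-- loop state: (new_lines, in_t, t_lines, t_header, t_footer)
def pvStepA (top_module : String) (kept_regs : List String)
    (st : List String × Bool × List String × String × String) (line : String) :
    List String × Bool × List String × String × String :=
  let (new_lines, in_t, t_lines, t_header, t_footer) := st
  if PySem.Str.startswith line ("(define-fun |" ++ top_module ++ "_t|") then
    (new_lines, true, [], line, t_footer)
  else if in_t then
    if PySem.Str.endswith (PySem.Str.strip line) (") ; end of module " ++ top_module) then
      let kept_lines := t_lines.foldl (fun ks tline =>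
        if PySem.Str.isIn ";" tline && PySem.Str.isIn "\\" tline then
          if kept_regs.contains
              (PySem.Str.strip ((PySem.List.pyGet? ((PySem.Str.split? tline "\\").getD []) (-1)).getD "")) then
            ks ++ [tline]
          else ks
        else ks ++ [tline]) ([] : List String)
      if kept_lines.isEmpty then
        (new_lines ++ ["(define-fun |" ++ top_module ++ "_t| ((state |" ++ top_module ++
          "_s|) (next_state |" ++ top_module ++ "_s|)) Bool true)"], false, t_lines, t_header, line)
      else
        (new_lines ++ [t_header] ++ kept_lines ++ [line], false, t_lines, t_header, line)
    else (new_lines, in_t, t_lines ++ [line], t_header, t_footer)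
  else (new_lines ++ [line], in_t, t_lines, t_header, t_footer)

def rewrite_transition_py (smt2_text : String) (top_module : String) (kept_regs : List String) : String :=
  PySem.Str.join "\n"
    ((PySem.Str.splitlines smt2_text).foldl (pvStepA top_module kept_regs) ([], false, [], "", "")).1

-- ===== PORT B =====
def pvKeepLine (kept_regs : List String) (tline : String) : Bool :=
  if PySem.Str.isIn ";" tline && PySem.Str.isIn "\\" tline then
    kept_regs.contains
      (PySem.Str.strip ((PySem.List.pyGet? ((PySem.Str.split? tline "\\").getD []) (-1)).getD ""))
  else true

def pvTrivialDef (top_module : String) : String :=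
  "(define-fun |" ++ top_module ++ "_t| ((state |" ++ top_module ++
    "_s|) (next_state |" ++ top_module ++ "_s|)) Bool true)"

-- loop of _split_at_headers; state: (prefix, segments)
def pvSplitStep (header_prefix : String) (st : List String × List (List String)) (line : String) :
    List String × List (List String) :=
  let (pre, segments) := st
  if PySem.Str.startswith line header_prefix then (pre, segments ++ [[line]])
  else if !segments.isEmpty then (pre, segments.dropLast ++ [(segments.getLastD []) ++ [line]])
  else (pre ++ [line], segments)

def pvSplitAtHeaders (lines : List String) (header_prefix : String) :
    List String × List (List String) :=
  lines.foldl (pvSplitStep header_prefix) ([], [])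

def pvProcessSegment (seg : List String) (footer_suffix : String) (top_module : String)
    (kept_regs : List String) : List String :=
  match seg with
  | [] => []  -- unreachable: every segment produced by pvSplitAtHeaders is nonempty
  | header :: rest =>
    match rest.findIdx? (fun line => PySem.Str.endswith (PySem.Str.strip line) footer_suffix) with
    | none => []  -- unterminated block: dropped entirely
    | some j =>
      let line := rest.getD j ""
      let kept := (rest.take j).filter (pvKeepLine kept_regs)
      let block := if !kept.isEmpty then [header] ++ kept ++ [line] else [pvTrivialDef top_module]
      block ++ rest.drop (j + 1)

def rewrite_transition_py_alt (smt2_text : String) (top_module : String) (kept_regs : List String) : String :=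
  let header_prefix := "(define-fun |" ++ top_module ++ "_t|"
  let footer_suffix := ") ; end of module " ++ top_module
  let ps := pvSplitAtHeaders (PySem.Str.splitlines smt2_text) header_prefix
  PySem.Str.join "\n"
    (ps.2.foldl (fun out seg => out ++ pvProcessSegment seg footer_suffix top_module kept_regs) ps.1)

-- ===== PRECONDITION & SPEC =====
def Spec_rewrite_transition_py (smt2_text : String) (top_module : String) (kept_regs : List String) (out : String) : Prop := out = rewrite_transition_py_alt smt2_text top_module kept_regs
instance (smt2_text : String) (top_module : String) (kept_regs : List String) (out : String) : Decidable (Spec_rewrite_transition_py smt2_text top_module kept_regs out) := by unfold Spec_rewrite_transition_py; infer_instance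

-- ===== CLAIM (what is proved, stated in full; the proofs are below) =====
def Claim_equal_rewrite_transition_py : Prop := ∀ (smt2_text : String) (top_module : String) (kept_regs : List String), Dom_rewrite_transition_py smt2_text top_module kept_regs → Spec_rewrite_transition_py smt2_text top_module kept_regs (rewrite_transition_py smt2_text top_module kept_regs)

-- ===== LEMMAS AND PROOFS =====

-- the common block output: header + filtered body + footer, or the trivial define-fun
def pvBlockOut (top_module : String) (kept_regs : List String)
    (header footer_line : String) (body : List String) : List String :=
  let kept := body.filter (pvKeepLine kept_regs)
  if !kept.isEmpty then [header] ++ kept ++ [footer_line] else [pvTrivialDef top_module]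

-- proof-side reference scanner (neither port is defined from it)
mutual
def pvScanOut (top_module : String) (kept_regs : List String) : List String → List String
  | [] => []
  | line :: rest =>
    if PySem.Str.startswith line ("(define-fun |" ++ top_module ++ "_t|") then
      pvScanBlock top_module kept_regs line [] rest
    else line :: pvScanOut top_module kept_regs rest

def pvScanBlock (top_module : String) (kept_regs : List String)
    (header : String) (body : List String) : List String → List String
  | [] => []
  | cur :: rest =>
    if PySem.Str.startswith cur ("(define-fun |" ++ top_module ++ "_t|") then
      pvScanBlock top_module kept_regs cur [] rest
    else if PySem.Str.endswith (PySem.Str.strip cur) (") ; end of module " ++ top_module) then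
      pvBlockOut top_module kept_regs header cur body ++ pvScanOut top_module kept_regs rest
    else pvScanBlock top_module kept_regs header (body ++ [cur]) rest
end

-- proof-side recursive splitter, equal to B's fold-based pvSplitAtHeaders
def pvRSplit (header_prefix : String) : List String → List String × List (List String)
  | [] => ([], [])
  | l :: rest =>
    let ps := pvRSplit header_prefix rest
    if PySem.Str.startswith l header_prefix then ([], (l :: ps.1) :: ps.2)
    else (l :: ps.1, ps.2)

-- A's inner kept_lines fold is the filter by pvKeepLine
lemma keptFold_eq_filter (kept_regs : List String) (tls : List String) :
    ∀ acc : List String,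
    tls.foldl (fun ks tline =>
        if PySem.Str.isIn ";" tline && PySem.Str.isIn "\\" tline then
          if kept_regs.contains
              (PySem.Str.strip ((PySem.List.pyGet? ((PySem.Str.split? tline "\\").getD []) (-1)).getD "")) then
            ks ++ [tline]
          else ks
        else ks ++ [tline]) acc
      = acc ++ tls.filter (pvKeepLine kept_regs) := by
  induction tls with
  | nil => simp
  | cons t rest ih =>
    intro acc
    simp only [List.foldl_cons, List.filter_cons, ih]
    unfold pvKeepLine
    split_ifs <;> simp_all

-- A's fold agrees with the reference scanner, in copy mode and in block mode
lemma scan_eq (top_module : String) (kept_regs : List String) (lines : List String) :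
    (∀ acc tls th tf,
      (lines.foldl (pvStepA top_module kept_regs) (acc, false, tls, th, tf)).1
        = acc ++ pvScanOut top_module kept_regs lines)
    ∧ (∀ acc tls th tf,
      (lines.foldl (pvStepA top_module kept_regs) (acc, true, tls, th, tf)).1
        = acc ++ pvScanBlock top_module kept_regs th tls lines) := by
  induction lines with
  | nil => simp [pvScanOut, pvScanBlock]
  | cons line rest ih =>
    constructor
    · intro acc tls th tf
      by_cases hh : PySem.Str.startswith line ("(define-fun |" ++ top_module ++ "_t|") = true
      · simp only [List.foldl_cons, pvStepA, hh, if_pos, pvScanOut]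
        simp [ih.2]
      · simp only [List.foldl_cons, pvStepA, hh, pvScanOut, Bool.false_eq_true, if_false]
        simp [ih.1]
    · intro acc tls th tf
      by_cases hh : PySem.Str.startswith line ("(define-fun |" ++ top_module ++ "_t|") = true
      · simp only [List.foldl_cons, pvStepA, hh, if_pos, pvScanBlock]
        simp [ih.2]
      · by_cases hf : PySem.Str.endswith (PySem.Str.strip line)
            (") ; end of module " ++ top_module) = true
        · simp only [List.foldl_cons, pvStepA, hh, hf, pvScanBlock, Bool.false_eq_true,
            if_false, if_pos]
          rw [keptFold_eq_filter kept_regs tls [], List.nil_append]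
          by_cases he : (tls.filter (pvKeepLine kept_regs)).isEmpty = true
          · simp [ih.1, pvBlockOut, pvTrivialDef, List.isEmpty_iff.mp he]
          · simp only [he, Bool.false_eq_true, if_false]
            rw [ih.1]
            simp [pvBlockOut, he]
        · simp only [List.foldl_cons, pvStepA, hh, hf, pvScanBlock, Bool.false_eq_true,
            if_false, if_true]
          rw [ih.2]

-- B's fold-based splitter computes pvRSplit
lemma split_eq_rsplit (hp : String) (lines : List String) :
    (∀ pre, lines.foldl (pvSplitStep hp) (pre, []) =
      (pre ++ (pvRSplit hp lines).1, (pvRSplit hp lines).2))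
    ∧ (∀ pre segs cur, lines.foldl (pvSplitStep hp) (pre, segs ++ [cur]) =
      (pre, segs ++ [cur ++ (pvRSplit hp lines).1] ++ (pvRSplit hp lines).2)) := by
  induction lines with
  | nil => simp [pvRSplit]
  | cons l rest ih =>
    constructor
    · intro pre
      by_cases hh : PySem.Str.startswith l hp = true
      · simp only [List.foldl_cons, pvSplitStep, hh, if_pos]
        simp only [PySem.Str.startswith_eq] at hh
        have := ih.2 pre [] [l]
        simp only [List.nil_append] at this
        simp [this, pvRSplit, hh]
      · simp only [List.foldl_cons, pvSplitStep, hh, Bool.false_eq_true, if_false,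
          List.isEmpty_nil, Bool.not_true]
        simp only [PySem.Str.startswith_eq] at hh
        simp [ih.1, pvRSplit, hh]
    · intro pre segs cur
      by_cases hh : PySem.Str.startswith l hp = true
      · simp only [List.foldl_cons, pvSplitStep, hh, if_pos]
        have h2 := ih.2 pre (segs ++ [cur]) [l]
        simp only [PySem.Str.startswith_eq] at hh
        simpa [pvRSplit, hh, List.append_assoc] using h2
      · simp only [List.foldl_cons, pvSplitStep, hh, Bool.false_eq_true, if_false]
        have hne : ((segs ++ [cur]).isEmpty) = false := by simp
        simp only [hne, Bool.not_false, if_pos, List.dropLast_concat, List.getLastD_concat]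
        simp only [PySem.Str.startswith_eq] at hh
        have := ih.2 pre segs (cur ++ [l])
        simp only [List.append_assoc] at this ⊢
        simp [this, pvRSplit, hh]

-- Q's right-hand side: process the current segment body p (accumulated body b) then emit t
def pvSegOut (tm : String) (kr : List String) (fs : String) (h : String) (b : List String)
    (p : List String) (t : List String) : List String :=
  match p.findIdx? (fun line => PySem.Str.endswith (PySem.Str.strip line) fs) with
  | none => t
  | some j => pvBlockOut tm kr h (p.getD j "") (b ++ p.take j) ++ p.drop (j + 1) ++ t

lemma segOut_nil (tm : String) (kr : List String) (fs h : String) (b t : List String) :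
    pvSegOut tm kr fs h b [] t = t := by
  simp [pvSegOut]

lemma segOut_footer (tm : String) (kr : List String) (fs h l : String) (b p t : List String)
    (hf : PySem.Str.endswith (PySem.Str.strip l) fs = true) :
    pvSegOut tm kr fs h b (l :: p) t = pvBlockOut tm kr h l b ++ p ++ t := by
  simp only [pvSegOut, List.findIdx?_cons, hf, if_pos]
  simp

lemma segOut_shift (tm : String) (kr : List String) (fs h l : String) (b p t : List String)
    (hf : ¬ PySem.Str.endswith (PySem.Str.strip l) fs = true) :
    pvSegOut tm kr fs h b (l :: p) t = pvSegOut tm kr fs h (b ++ [l]) p t := by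
  simp only [pvSegOut, List.findIdx?_cons, hf, Bool.false_eq_true, if_false]
  cases hfi : p.findIdx? (fun line => PySem.Str.endswith (PySem.Str.strip line) fs) with
  | none => simp
  | some j => simp

lemma segOut_proc (tm : String) (kr : List String) (fs h : String) (p t : List String) :
    pvSegOut tm kr fs h [] p t = pvProcessSegment (h :: p) fs tm kr ++ t := by
  simp only [pvSegOut, pvProcessSegment]
  cases hfi : p.findIdx? (fun line => PySem.Str.endswith (PySem.Str.strip line) fs) with
  | none => simp
  | some j => simp [pvBlockOut]

-- the reference scanner computes B's split-then-process pipeline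
lemma scanner_eq_pipeline (tm : String) (kr : List String) (lines : List String) :
    (pvScanOut tm kr lines =
      (pvRSplit ("(define-fun |" ++ tm ++ "_t|") lines).1 ++
        ((pvRSplit ("(define-fun |" ++ tm ++ "_t|") lines).2.map
          (fun s => pvProcessSegment s (") ; end of module " ++ tm) tm kr)).flatten)
    ∧ (∀ h b, pvScanBlock tm kr h b lines =
        pvSegOut tm kr (") ; end of module " ++ tm) h b
          (pvRSplit ("(define-fun |" ++ tm ++ "_t|") lines).1
          (((pvRSplit ("(define-fun |" ++ tm ++ "_t|") lines).2.map
            (fun s => pvProcessSegment s (") ; end of module " ++ tm) tm kr)).flatten)) := by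
  induction lines with
  | nil => simp [pvScanOut, pvScanBlock, pvRSplit, segOut_nil]
  | cons l rest ih =>
    constructor
    · by_cases hh : PySem.Str.startswith l ("(define-fun |" ++ tm ++ "_t|") = true
      · simp only [pvScanOut, hh, if_pos]
        rw [ih.2 l [], segOut_proc]
        simp only [pvRSplit, hh, if_pos]
        simp
      · simp only [pvScanOut, hh, Bool.false_eq_true, if_false]
        rw [ih.1]
        simp only [pvRSplit, hh, Bool.false_eq_true, if_false]
        simp
    · intro h b
      by_cases hh : PySem.Str.startswith l ("(define-fun |" ++ tm ++ "_t|") = true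
      · simp only [pvScanBlock, hh, if_pos]
        rw [ih.2 l [], segOut_proc]
        simp only [pvRSplit, hh, if_pos]
        rw [segOut_nil]
        simp
      · by_cases hf : PySem.Str.endswith (PySem.Str.strip l)
            (") ; end of module " ++ tm) = true
        · simp only [pvScanBlock, hh, hf, Bool.false_eq_true, if_false, if_pos]
          rw [ih.1]
          simp only [pvRSplit, hh, Bool.false_eq_true, if_false]
          rw [segOut_footer _ _ _ _ _ _ _ _ hf]
          simp
        · simp only [pvScanBlock, hh, hf, Bool.false_eq_true, if_false]
          rw [ih.2 h (b ++ [l])]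
          simp only [pvRSplit, hh, Bool.false_eq_true, if_false]
          rw [segOut_shift _ _ _ _ _ _ _ _ hf]

-- ===== VERDICT (by name: the statement is the Claim_ definition above) =====
theorem rewrite_transition_py_spec : Claim_equal_rewrite_transition_py := by
  intro smt2_text top_module kept_regs _
  unfold Spec_rewrite_transition_py rewrite_transition_py rewrite_transition_py_alt
  rw [(scan_eq top_module kept_regs (PySem.Str.splitlines smt2_text)).1 [] [] "" "",
    List.nil_append, (scanner_eq_pipeline top_module kept_regs (PySem.Str.splitlines smt2_text)).1]
  have hsplit := (split_eq_rsplit ("(define-fun |" ++ top_module ++ "_t|")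
    (PySem.Str.splitlines smt2_text)).1 []
  simp only [pvSplitAtHeaders, hsplit, List.nil_append,
    PySem.List.foldl_append_eq_flatMap]
  simp [List.flatMap]
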